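-- pv_equiv track=rewrite | github.com/zodiak-app/Soccer-Clock | Soccer-clock.py | _reduce_samples
-- ===== SOURCE A (Python) =====
-- def _reduce_samples(samples, count):
--     if not samples: return []
--     block = max(1, len(samples) // count)
--     reduced = []
--     for i in range(0, len(samples), block):
--         chunk = samples[i:i+block]
--         if chunk: reduced.append(max(chunk))
--     return reduced
-- ===== SOURCE B (Python) =====
-- def _reduce_samples(samples, count):
--     if not samples:
--         return []
--     block = max(1, len(samples) // count)
--     reduced = []
--     cur = samples[0]
--     k = block - 1          # slots left in the current block
--     for x in samples[1:]:
--         if k == 0: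
--             reduced.append(cur)
--             cur = x
--             k = block - 1
--         else:
--             if x > cur:
--                 cur = x
--             k -= 1
--     reduced.append(cur)
--     return reduced
-- ===== Notes on version B (the rewrite author's own statement) =====
-- stated objective: faster
-- what changed: Replaces the slice-per-block loop (range stepping plus samples[i:i+block] and max() on each slice) by a single streaming pass over the elements that keeps a running maximum and a countdown of slots left in the current block, flushing at each boundary and once at the end.
import Mathlib
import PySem

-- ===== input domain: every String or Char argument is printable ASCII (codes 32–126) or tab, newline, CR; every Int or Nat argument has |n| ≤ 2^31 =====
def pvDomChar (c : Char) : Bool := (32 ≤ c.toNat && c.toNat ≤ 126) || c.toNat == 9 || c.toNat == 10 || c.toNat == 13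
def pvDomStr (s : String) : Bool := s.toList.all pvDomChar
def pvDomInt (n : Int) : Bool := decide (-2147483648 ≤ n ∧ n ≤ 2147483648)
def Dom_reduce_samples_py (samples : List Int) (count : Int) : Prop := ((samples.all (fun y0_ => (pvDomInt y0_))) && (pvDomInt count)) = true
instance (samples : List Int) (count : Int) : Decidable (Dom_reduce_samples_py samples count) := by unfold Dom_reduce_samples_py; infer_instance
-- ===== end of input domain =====

-- B streams one running maximum per block in a single element-wise pass (countdown of
-- slots left in the block) instead of slicing each block and calling max on the slice.

-- ===== PORT A =====
def reduce_samples_py (samples : List Int) (count : Int) : List Int :=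
  if samples = [] then []
  else
    let block := max 1 (PySem.Int.floordiv (samples.length : Int) count)
    (PySem.List.pyRange 0 (samples.length : Int) block).foldl
      (fun reduced i =>
        let chunk := PySem.List.slice samples (some i) (some (i + block))
        if chunk ≠ [] then reduced ++ [(PySem.List.max? chunk (fun y => y)).getD 0]
        else reduced)
      []

-- ===== PORT B =====
-- the `for x in samples[1:]` loop of Source B: state = (cur, k, reduced)
def pvAltLoop (block : Int) : List Int → Int → Int → List Int → List Int
  | [], cur, _, reduced => reduced ++ [cur]
  | x :: rest, cur, k, reduced =>
    if k = 0 then pvAltLoop block rest x (block - 1) (reduced ++ [cur])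
    else pvAltLoop block rest (if x > cur then x else cur) (k - 1) reduced

def reduce_samples_py_alt (samples : List Int) (count : Int) : List Int :=
  match samples with
  | [] => []
  | x :: rest =>
    let block := max 1 (PySem.Int.floordiv (samples.length : Int) count)
    pvAltLoop block rest x (block - 1) []

-- ===== PRECONDITION & SPEC =====
-- Pre_ excludes only count = 0 with nonempty samples, where Python A raises ZeroDivisionError.
def Pre_reduce_samples_py (samples : List Int) (count : Int) : Prop :=
  samples = [] ∨ count ≠ 0
instance (samples : List Int) (count : Int) : Decidable (Pre_reduce_samples_py samples count) := by unfold Pre_reduce_samples_py; infer_instance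
def pvWitness_reduce_samples_py : List Int × Int := ([3, 1, 2, 5], 2)

def Spec_reduce_samples_py (samples : List Int) (count : Int) (out : List Int) : Prop := out = reduce_samples_py_alt samples count
instance (samples : List Int) (count : Int) (out : List Int) : Decidable (Spec_reduce_samples_py samples count out) := by unfold Spec_reduce_samples_py; infer_instance

-- ===== CLAIM (what is proved, stated in full; the proofs are below) =====
def Claim_equal_reduce_samples_py : Prop := ∀ (samples : List Int) (count : Int), Dom_reduce_samples_py samples count → Pre_reduce_samples_py samples count → Spec_reduce_samples_py samples count (reduce_samples_py samples count)

-- ===== LEMMAS AND PROOFS =====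

-- the common characterisation: maxima of successive blocks of size B
def pvCMax (B : Nat) : List Int → List Int
  | [] => []
  | x :: t => (List.foldl max x (t.take (B - 1))) :: pvCMax B (t.drop (B - 1))
  termination_by l => l.length
  decreasing_by simp

@[simp] lemma pvCMax_nil (B : Nat) : pvCMax B [] = [] := by
  unfold pvCMax
  rfl

lemma pvCMax_cons (B : Nat) (x : Int) (t : List Int) :
    pvCMax B (x :: t) = (List.foldl max x (t.take (B - 1))) :: pvCMax B (t.drop (B - 1)) := by
  conv_lhs => unfold pvCMax

lemma pvAltLoop_eq (B : Nat) (hB : 1 ≤ B) :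
    ∀ (l : List Int) (k : Nat) (cur : Int) (acc : List Int),
      pvAltLoop (B : Int) l cur (k : Int) acc
        = acc ++ (List.foldl max cur (l.take k)) :: pvCMax B (l.drop k) := by
  intro l
  induction l with
  | nil => intro k cur acc; simp [pvAltLoop]
  | cons x rest ih =>
    intro k cur acc
    cases k with
    | zero =>
      have hcast : (B : Int) - 1 = ((B - 1 : Nat) : Int) := by omega
      simp only [pvAltLoop, Nat.cast_zero, hcast]
      rw [ih (B - 1) x (acc ++ [cur])]
      simp [pvCMax_cons]
    | succ j =>
      have hne : ((j + 1 : Nat) : Int) ≠ 0 := by omega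
      have hcast : ((j + 1 : Nat) : Int) - 1 = (j : Int) := by omega
      simp only [pvAltLoop, if_neg hne, hcast]
      rw [ih j (if x > cur then x else cur) acc]
      have hmax : (if x > cur then x else cur) = max cur x := by
        rw [max_def]; split_ifs <;> omega
      simp [hmax, List.take_succ_cons, List.foldl_cons]

lemma pvPyRange_nil (a b s : Int) (hs : 0 < s) (hab : b ≤ a) :
    PySem.List.pyRange a b s = [] := by
  rw [PySem.List.pyRange_of_pos _ _ hs]
  simp [not_lt.mpr hab]

lemma pvPyRange_cons (a b s : Int) (hs : 0 < s) (hab : a < b) :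
    PySem.List.pyRange a b s = a :: PySem.List.pyRange (a + s) b s := by
  rw [PySem.List.pyRange_of_pos _ _ hs, PySem.List.pyRange_of_pos _ _ hs]
  have ht : (0 : Int) ≤ b - a - 1 := by omega
  have hdiv : (b - a + s - 1) / s = (b - a - 1) / s + 1 := by
    have he : b - a + s - 1 = (b - a - 1) + 1 * s := by ring
    rw [he, Int.add_mul_ediv_right _ _ (ne_of_gt hs)]
  have hq0 : (0 : Int) ≤ (b - a - 1) / s := Int.ediv_nonneg ht (le_of_lt hs)
  have hn : ((b - a + s - 1) / s).toNat = ((b - a - 1) / s).toNat + 1 := by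
    rw [hdiv]; omega
  by_cases h2 : a + s < b
  · have hdiv2 : b - (a + s) + s - 1 = b - a - 1 := by ring
    simp only [if_pos hab, if_pos h2, hdiv2, hn]
    rw [List.range_succ_eq_map]
    simp only [List.map_cons, List.map_map, Nat.cast_zero, mul_zero, add_zero]
    refine List.cons_eq_cons.mpr ⟨rfl, List.map_congr_left ?_⟩
    intro k _
    simp only [Function.comp_apply]
    push_cast
    ring
  · -- last block: (b-a-1)/s = 0 since 0 ≤ b-a-1 < s
    have hlt : b - a - 1 < s := by omega
    have : (b - a - 1) / s = 0 := Int.ediv_eq_zero_of_lt ht hlt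
    simp only [if_pos hab, if_neg h2, hn, this]
    simp

lemma pvFoldA_eq (samples : List Int) (B : Nat) (hB : 1 ≤ B) :
    ∀ (fuel j : Nat), samples.length - j ≤ fuel →
      (PySem.List.pyRange (j : Int) (samples.length : Int) (B : Int)).foldl
        (fun reduced i =>
          let chunk := PySem.List.slice samples (some i) (some (i + (B : Int)))
          if chunk ≠ [] then reduced ++ [(PySem.List.max? chunk (fun y => y)).getD 0]
          else reduced)
        acc
        = acc ++ pvCMax B (samples.drop j) := by
  intro fuel
  induction fuel generalizing acc with
  | zero =>
    intro j hj
    have hge : samples.length ≤ j := by omega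
    rw [pvPyRange_nil _ _ _ (by exact_mod_cast hB) (by exact_mod_cast hge)]
    rw [List.drop_eq_nil_of_le hge]
    simp
  | succ fuel ih =>
    intro j hj
    by_cases hlt : j < samples.length
    · rw [pvPyRange_cons _ _ _ (by exact_mod_cast hB) (by exact_mod_cast hlt)]
      rw [List.foldl_cons]
      have hslice : PySem.List.slice samples (some (j : Int)) (some ((j : Int) + (B : Int))) =
          (samples.drop j).take B := PySem.List.slice_natCast_add samples j B
      obtain ⟨x, t, hxt⟩ : ∃ x t, samples.drop j = x :: t := by
        rcases hd : samples.drop j with _ | ⟨x, t⟩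
        · exfalso; have := List.drop_eq_nil_iff.mp hd; omega
        · exact ⟨x, t, rfl⟩
      have hchunk : (samples.drop j).take B = x :: t.take (B - 1) := by
        rw [hxt]
        cases B with
        | zero => omega
        | succ m => simp
      simp only [hslice, hchunk]
      rw [PySem.List.max?_id_cons]
      simp only [ne_eq, reduceCtorEq, not_false_eq_true, if_pos, Option.getD_some]
      have hcst : (j : Int) + (B : Int) = ((j + B : Nat) : Int) := by push_cast; ring
      rw [hcst, ih (j + B) (by omega)]
      have hdropt : samples.drop (j + B) = t.drop (B - 1) := by
        have h1 : samples.drop (j + B) = (samples.drop j).drop B := by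
          rw [List.drop_drop]
        rw [h1, hxt]
        cases B with
        | zero => omega
        | succ m => simp
      rw [hdropt, hxt]
      rw [pvCMax_cons]
      simp
    · have hge : samples.length ≤ j := by omega
      rw [pvPyRange_nil _ _ _ (by exact_mod_cast hB) (by exact_mod_cast hge)]
      rw [List.drop_eq_nil_of_le hge]
      simp

-- ===== VERDICT (by name: the statement is the Claim_ definition above) =====
theorem reduce_samples_py_spec : Claim_equal_reduce_samples_py := by
  intro samples count _ _
  unfold Spec_reduce_samples_py reduce_samples_py reduce_samples_py_alt
  cases samples with
  | nil => simp
  | cons x rest =>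
    simp only [reduceCtorEq, if_false]
    set b := max 1 (PySem.Int.floordiv (((x :: rest).length : Nat) : Int) count) with hb
    have hb1 : (1 : Int) ≤ b := le_max_left _ _
    have hbnn : (0 : Int) ≤ b := by omega
    set B := b.toNat with hB
    have hbc : b = (B : Int) := by omega
    have hB1 : 1 ≤ B := by omega
    rw [hbc]
    have hA := pvFoldA_eq (acc := []) (x :: rest) B hB1 (x :: rest).length 0 (by omega)
    simp only [Nat.cast_zero, List.drop_zero] at hA
    rw [hA]
    have hcast : (B : Int) - 1 = ((B - 1 : Nat) : Int) := by omega
    rw [hcast, pvAltLoop_eq B hB1 rest (B - 1) x [], pvCMax_cons]
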